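-- pv_equiv track=rewrite | github.com/martinbong/gpt_for_terminal | mastermind.py | code_dict
-- ===== SOURCE A (Python) =====
-- def code_dict(letters, code):
--     code_d = {}
--     for i in letters:
--         code_d[i] = code_d.get(i, 0)
--     for i in code:
--         if i in code_d:
--             code_d[i] += 1
--     return code_d
-- ===== SOURCE B (Python) =====
-- def code_dict(letters, code):
--     # Brute force: no counting dict over code; scan code once per requested letter.
--     return {i: sum(1 for ch in code if ch == i) for i in letters}
-- ===== Notes on version B (the rewrite author's own statement) =====
-- stated objective: alternative
-- what changed: A seeds a zero dict from letters and then makes one hash-counting pass over code guarded by dict membership; B keeps no count table at all and instead scans code once per letter (nested scans), building the result dict directly.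
import Mathlib
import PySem

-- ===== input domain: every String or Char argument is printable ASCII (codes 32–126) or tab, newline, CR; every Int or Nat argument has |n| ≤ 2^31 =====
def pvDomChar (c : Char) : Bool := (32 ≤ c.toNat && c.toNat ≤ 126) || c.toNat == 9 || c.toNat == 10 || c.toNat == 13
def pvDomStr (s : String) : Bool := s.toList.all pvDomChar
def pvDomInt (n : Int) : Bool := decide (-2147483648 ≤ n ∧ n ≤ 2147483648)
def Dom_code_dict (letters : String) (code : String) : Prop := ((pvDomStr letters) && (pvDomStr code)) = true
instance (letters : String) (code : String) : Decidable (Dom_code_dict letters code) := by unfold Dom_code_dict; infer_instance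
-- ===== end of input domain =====

-- B keeps no count table: it scans code once per letter (nested scans) and builds the
-- result dict directly, instead of A's seed-zero-dict + hash-counting pass (alternative).

-- ===== PORT A =====
-- iterating a Python string yields one-character strings
def pvKey (c : Char) : String := String.ofList [c]

def code_dict (letters : String) (code : String) : List (String × Int) :=
  let d0 : PySem.Dict String Int :=
    letters.toList.foldl (fun d c => d.insert (pvKey c) (d.getD (pvKey c) 0)) PySem.Dict.empty
  let d1 :=
    code.toList.foldl
      (fun d c => if d.contains (pvKey c) then d.modify (pvKey c) 0 (· + 1) else d) d0
  d1.items

-- ===== PORT B =====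
-- sum(1 for ch in code if ch == i), as a fold over code's characters
def pvScanCount (code : String) (k : String) : Int :=
  code.toList.foldl (fun acc x => if pvKey x == k then acc + 1 else acc) 0

def code_dict_alt (letters : String) (code : String) : List (String × Int) :=
  (letters.toList.foldl
      (fun d c => d.insert (pvKey c) (pvScanCount code (pvKey c))) PySem.Dict.empty).items

-- ===== PRECONDITION & SPEC =====
def Spec_code_dict (letters : String) (code : String) (out : List (String × Int)) : Prop := out = code_dict_alt letters code
instance (letters : String) (code : String) (out : List (String × Int)) : Decidable (Spec_code_dict letters code out) := by unfold Spec_code_dict; infer_instance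

-- ===== CLAIM (what is proved, stated in full; the proofs are below) =====
def Claim_equal_code_dict : Prop := ∀ (letters : String) (code : String), Dom_code_dict letters code → Spec_code_dict letters code (code_dict letters code)

-- ===== LEMMAS AND PROOFS =====

-- A's first loop never changes any lookup value (it inserts each key's current default).
theorem getD_zeroLoop (l : List Char) (d : PySem.Dict String Int) (k : String) :
    (l.foldl (fun d c => d.insert (pvKey c) (d.getD (pvKey c) 0)) d).getD k 0 = d.getD k 0 := by
  induction l generalizing d with
  | nil => rfl
  | cons x xs ih =>
      simp only [List.foldl_cons, ih]
      rw [PySem.Dict.getD_insert]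
      split <;> simp_all

-- A's second loop leaves the key list unchanged (it only modifies existing keys).
theorem keys_countLoop (l : List Char) (d : PySem.Dict String Int) :
    (l.foldl (fun d c => if d.contains (pvKey c) then d.modify (pvKey c) 0 (· + 1) else d) d).keys
      = d.keys := by
  induction l generalizing d with
  | nil => rfl
  | cons x xs ih =>
      simp only [List.foldl_cons, ih]
      by_cases h : d.contains (pvKey x)
      · simp only [h, if_true]
        rw [PySem.Dict.keys_modify, PySem.Dict.keys_insert_of_contains _ _ h]
      · simp [h]

-- A's second loop adds, to each key present in d, its count in the remaining characters.
theorem getD_countLoop (l : List Char) (d : PySem.Dict String Int) (k : String) :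
    (l.foldl (fun d c => if d.contains (pvKey c) then d.modify (pvKey c) 0 (· + 1) else d) d).getD k 0
      = d.getD k 0 + (if d.contains k then ((l.map pvKey).count k : Int) else 0) := by
  induction l generalizing d with
  | nil => simp
  | cons x xs ih =>
      simp only [List.foldl_cons, List.map_cons]
      by_cases h : d.contains (pvKey x)
      · simp only [h, if_true, ih]
        have hc : ∀ k', (d.modify (pvKey x) 0 (· + 1)).contains k' = (k' == pvKey x || d.contains k') :=
          fun k' => PySem.Dict.contains_modify d (pvKey x) k' 0 (· + 1)
        rw [PySem.Dict.getD_modify, hc]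
        by_cases hk : k = pvKey x
        · subst hk; simp [h]; ring
        · simp [hk, Ne.symm hk]
      · simp only [h, ih]
        by_cases hk : k = pvKey x
        · subst hk; simp [h]
        · simp [Ne.symm hk]

-- B's comprehension loop: the final value of any key of l is its (key-only) inserted value.
theorem getD_insertFunLoop (g : String → Int) (l : List Char) (d : PySem.Dict String Int) (k : String) :
    (l.foldl (fun d c => d.insert (pvKey c) (g (pvKey c))) d).getD k 0
      = if k ∈ l.map pvKey then g k else d.getD k 0 := by
  induction l generalizing d with
  | nil => simp
  | cons x xs ih =>
      simp only [List.foldl_cons, List.map_cons, List.mem_cons, ih]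
      by_cases hx : k ∈ xs.map pvKey
      · simp [hx]
      · by_cases hk : k = pvKey x
        · subst hk; simp [hx]
        · simp [hx, hk, PySem.Dict.getD_insert]

-- B's inner scan of code counts the key among code's one-character strings.
theorem pvScanCount_eq (code : String) (k : String) :
    pvScanCount code k = ((code.toList.map pvKey).count k : Int) := by
  unfold pvScanCount
  rw [← List.foldl_map (f := pvKey)
        (g := fun (acc : Int) x => if x == k then acc + 1 else acc),
      PySem.List.foldl_beq_add_one]
  simp

theorem code_dict_eq (letters code : String) :
    code_dict letters code = code_dict_alt letters code := by
  unfold code_dict code_dict_alt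
  simp only []
  set L := letters.toList with hL
  set C := code.toList with hC
  set d0 : PySem.Dict String Int :=
    L.foldl (fun d c => d.insert (pvKey c) (d.getD (pvKey c) 0)) PySem.Dict.empty with hd0
  set d1 := C.foldl
      (fun d c => if d.contains (pvKey c) then d.modify (pvKey c) 0 (· + 1) else d) d0 with hd1
  set d2 := L.foldl (fun d c => d.insert (pvKey c) (pvScanCount code (pvKey c))) PySem.Dict.empty with hd2
  -- the key lists agree
  have hkeys0 : d0.keys = PySem.Set.ofList (L.map pvKey) := by
    rw [hd0, PySem.Dict.keys_foldl_insert_key L pvKey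
        (fun d c => d.getD (pvKey c) 0) PySem.Dict.empty, PySem.Dict.keys_empty]
    rfl
  have hkeys1 : d1.keys = PySem.Set.ofList (L.map pvKey) := by
    rw [hd1, keys_countLoop, hkeys0]
  have hkeys2 : d2.keys = PySem.Set.ofList (L.map pvKey) := by
    rw [hd2, PySem.Dict.keys_foldl_insert_key L pvKey
        (fun _ c => pvScanCount code (pvKey c)) PySem.Dict.empty, PySem.Dict.keys_empty]
    rfl
  have hnd1 : d1.keys.Nodup := by
    rw [hkeys1]; exact PySem.Set.nodup_ofList _
  have hnd2 : d2.keys.Nodup := by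
    rw [hkeys2]; exact PySem.Set.nodup_ofList _
  rw [PySem.Dict.items_eq_map_keys d1 hnd1 0, PySem.Dict.items_eq_map_keys d2 hnd2 0,
      hkeys1, hkeys2]
  apply List.map_congr_left
  intro k hk
  have hkL : k ∈ L.map pvKey := (PySem.Set.mem_ofList _ _).mp hk
  have hcont : d0.contains k = true := by
    rw [PySem.Dict.contains_iff_mem_keys, hkeys0, PySem.Set.mem_ofList]; exact hkL
  have h1 : d1.getD k 0 = ((C.map pvKey).count k : Int) := by
    rw [hd1, getD_countLoop, hcont, if_pos rfl, getD_zeroLoop, PySem.Dict.getD_empty]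
    ring
  have h2 : d2.getD k 0 = ((C.map pvKey).count k : Int) := by
    rw [hd2, getD_insertFunLoop (fun k => pvScanCount code k), if_pos hkL, pvScanCount_eq]
  rw [h1, h2]

-- ===== VERDICT (by name: the statement is the Claim_ definition above) =====
theorem code_dict_spec : Claim_equal_code_dict := by
  intro letters code _
  unfold Spec_code_dict
  exact code_dict_eq letters code
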